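-- pv_equiv track=rewrite | github.com/KangEunSeok/HYU_assignments | Data_Science/assignment2/dt.py | make_attr_dict_list
-- ===== SOURCE A (Python) =====
-- def make_attr_dict_list(trans):  # make attribute dictionary
--     attrs_dict_list = []
--     attr_domains = []
--     for i in range(len(trans[0])-1):  # get attrs domain and attrs_value dictionary
--         attr = trans[0][i]
--         attr_domain = []
--         attr_dict = dict()
--         for j in range(1, len(trans)):   # get attr domain
--             attr_domain.append(trans[j][i])
--         attr_domain = list(set(attr_domain))
--         attr_domain.sort()
--         for j in range(len(attr_domain)):
--             attr_dict[attr_domain[j]] = []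
--         for key in attr_dict.keys():   # ex {'<=30': [yes, yes, no ...., yes] ... }
--             for j in range(1,len(trans)):
--                 if key == trans[j][i]:
--                     attr_dict[key].append(trans[j][-1])
--         attrs_dict_list.append(attr_dict)
--
--     for i in range(len(attrs_dict_list)):
--         domain = []
--         for key in attrs_dict_list[i].keys():
--             domain.append(key)
--         attr_domains.append(domain)
--
--     return attrs_dict_list, attr_domains
-- ===== SOURCE B (Python) =====
-- def make_attr_dict_list(trans):  # single grouping pass per attribute instead of per-key rescans
--     rows = trans[1:]
--     dicts = []
--     for i in range(len(trans[0]) - 1):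
--         d = {v: [] for v in sorted({r[i] for r in rows})}
--         for r in rows:
--             d[r[i]].append(r[-1])
--         dicts.append(d)
--     return dicts, [list(d) for d in dicts]
-- ===== Notes on version B (the rewrite author's own statement) =====
-- stated objective: faster
-- what changed: Replaces the per-key rescan of all rows (for every key in the domain, scan every row again) by one dict-initialisation over the sorted domain followed by a single grouping pass that appends each row's label to its value's bucket; the separate key-collection loop becomes a direct list(d).
import Mathlib
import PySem

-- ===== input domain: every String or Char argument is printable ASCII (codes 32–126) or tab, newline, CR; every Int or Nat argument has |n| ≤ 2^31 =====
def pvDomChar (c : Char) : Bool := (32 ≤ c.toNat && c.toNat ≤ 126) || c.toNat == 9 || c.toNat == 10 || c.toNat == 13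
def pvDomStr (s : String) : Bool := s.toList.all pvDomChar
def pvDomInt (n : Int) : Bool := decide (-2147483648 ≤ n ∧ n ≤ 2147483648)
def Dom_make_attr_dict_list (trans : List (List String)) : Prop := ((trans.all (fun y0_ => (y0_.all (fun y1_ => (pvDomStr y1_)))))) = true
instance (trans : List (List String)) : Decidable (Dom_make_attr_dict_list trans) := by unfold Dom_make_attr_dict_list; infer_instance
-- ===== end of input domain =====

-- B replaces A's per-key rescan of all rows by a single grouping pass per attribute (objective: faster).

-- ===== PORT A =====
-- literal transliteration of A; 'attr = trans[0][i]' is bound but never used in the Python and is omitted;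
-- list(set(xs)) followed by .sort() is ported as sorted(set(xs)) (the unspecified set order is erased by the sort);
-- Python's local variables (attr_domain, attr_dict, domain) are inlined, the computations are unchanged
def make_attr_dict_list (trans : List (List String)) : (List (List (String × List String))) × List (List String) :=
  let attrs_dict_list : List (PySem.Dict String (List String)) :=
    (PySem.List.pyRange 0 (((PySem.List.pyGetD trans 0 []).length : Int) - 1)).foldl
      (fun attrs_dict_list i =>
        attrs_dict_list ++
          [((PySem.List.pyRange 0
                (((PySem.List.sorted (PySem.Set.ofList
                    ((PySem.List.pyRange 1 (trans.length : Int)).foldl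
                      (fun acc j => acc ++ [PySem.List.pyGetD (PySem.List.pyGetD trans j []) i ""]) []))
                    (fun x => x)).length : Int))).foldl
              (fun d j =>
                d.insert
                  (PySem.List.pyGetD
                    (PySem.List.sorted (PySem.Set.ofList
                      ((PySem.List.pyRange 1 (trans.length : Int)).foldl
                        (fun acc j => acc ++ [PySem.List.pyGetD (PySem.List.pyGetD trans j []) i ""]) []))
                      (fun x => x)) j "")
                  ([] : List String)) PySem.Dict.empty).keys.foldl
            (fun d key =>
              (PySem.List.pyRange 1 (trans.length : Int)).foldl
                (fun d j =>
                  if key == PySem.List.pyGetD (PySem.List.pyGetD trans j []) i "" then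
                    d.modify key [] (fun v => v ++ [PySem.List.pyGetD (PySem.List.pyGetD trans j []) (-1) ""])
                  else d) d)
            ((PySem.List.pyRange 0
                (((PySem.List.sorted (PySem.Set.ofList
                    ((PySem.List.pyRange 1 (trans.length : Int)).foldl
                      (fun acc j => acc ++ [PySem.List.pyGetD (PySem.List.pyGetD trans j []) i ""]) []))
                    (fun x => x)).length : Int))).foldl
              (fun d j =>
                d.insert
                  (PySem.List.pyGetD
                    (PySem.List.sorted (PySem.Set.ofList
                      ((PySem.List.pyRange 1 (trans.length : Int)).foldl
                        (fun acc j => acc ++ [PySem.List.pyGetD (PySem.List.pyGetD trans j []) i ""]) []))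
                      (fun x => x)) j "")
                  ([] : List String)) PySem.Dict.empty)]) []
  let attr_domains : List (List String) :=
    (PySem.List.pyRange 0 ((attrs_dict_list.length : Int))).foldl
      (fun acc i =>
        acc ++ [(PySem.List.pyGetD attrs_dict_list i PySem.Dict.empty).keys.foldl
                  (fun dm key => dm ++ [key]) []]) []
  (attrs_dict_list.map (fun d => d.items), attr_domains)

-- ===== PORT B =====
-- literal transliteration of Source B; the dict comprehension '{v: [] for v in …}' is the insert-fold over its keys,
-- 'list(d)' is d.keys
def make_attr_dict_list_alt (trans : List (List String)) : (List (List (String × List String))) × List (List String) :=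
  let rows := PySem.List.slice trans (some 1) none
  let dicts : List (PySem.Dict String (List String)) :=
    (PySem.List.pyRange 0 (((PySem.List.pyGetD trans 0 []).length : Int) - 1)).map
      (fun i =>
        rows.foldl
          (fun d r =>
            d.modify (PySem.List.pyGetD r i "") [] (fun v => v ++ [PySem.List.pyGetD r (-1) ""]))
          ((PySem.List.sorted (PySem.Set.ofList (rows.map (fun r => PySem.List.pyGetD r i ""))) (fun x => x)).foldl
            (fun d v => d.insert v ([] : List String)) PySem.Dict.empty))
  (dicts.map (fun d => d.items), dicts.map (fun d => d.keys))

-- ===== PRECONDITION & SPEC =====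
-- Pre_ excludes exactly the inputs where the Python A raises IndexError: an empty trans (trans[0]),
-- and data rows shorter than the attribute count (trans[j][i] / trans[j][-1] on a too-short or empty row).
def Pre_make_attr_dict_list (trans : List (List String)) : Prop :=
  trans ≠ [] ∧ ∀ row ∈ trans.drop 1, (PySem.List.pyGetD trans 0 ([] : List String)).length - 1 ≤ row.length
instance (trans : List (List String)) : Decidable (Pre_make_attr_dict_list trans) := by
  unfold Pre_make_attr_dict_list; infer_instance
def pvWitness_make_attr_dict_list : List (List String) := [["a", "c"], ["x", "yes"], ["y", "no"]]

def Spec_make_attr_dict_list (trans : List (List String)) (out : (List (List (String × List String))) × List (List String)) : Prop := out = make_attr_dict_list_alt trans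
instance (trans : List (List String)) (out : (List (List (String × List String))) × List (List String)) : Decidable (Spec_make_attr_dict_list trans out) := by unfold Spec_make_attr_dict_list; infer_instance

-- ===== CLAIM (what is proved, stated in full; the proofs are below) =====
def Claim_equal_make_attr_dict_list : Prop := ∀ (trans : List (List String)), Dom_make_attr_dict_list trans → Pre_make_attr_dict_list trans → Spec_make_attr_dict_list trans (make_attr_dict_list trans)

-- ===== LEMMAS AND PROOFS =====

theorem ksOf_nodup (rows : List (List String)) (i : Int) :
    (PySem.List.sorted (PySem.Set.ofList (rows.map (fun r => PySem.List.pyGetD r i ""))) (fun x => x)).Nodup :=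
  (PySem.List.sorted_ofList_pairwise_lt _).imp ne_of_lt

theorem ksOf_mem (rows : List (List String)) (i : Int) (r : List String) (hr : r ∈ rows) :
    PySem.List.pyGetD r i "" ∈ PySem.List.sorted (PySem.Set.ofList (rows.map (fun r => PySem.List.pyGetD r i ""))) (fun x => x) := by
  rw [PySem.List.mem_sorted, PySem.Set.mem_ofList]
  exact List.mem_map_of_mem hr

def initDict (ks : List String) : PySem.Dict String (List String) :=
  ks.foldl (fun d v => d.insert v ([] : List String)) PySem.Dict.empty

theorem initDict_items (ks : List String) (hn : ks.Nodup) :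
    (initDict ks).items = ks.map (fun k => (k, ([] : List String))) := by
  unfold initDict
  rw [PySem.Dict.items_foldl_insert_fresh ks (fun v => v) (fun _ => ([] : List String)) PySem.Dict.empty
    (by intro a _; simp [PySem.Dict.contains_empty]) (by simpa using hn)]
  simp [PySem.Dict.empty]

theorem initDict_keys (ks : List String) (hn : ks.Nodup) : (initDict ks).keys = ks := by
  simp only [PySem.Dict.keys, initDict_items ks hn]
  simp [Function.comp_def]

theorem initDict_getD_aux (ks : List String) (d : PySem.Dict String (List String))
    (h : ∀ c, d.getD c [] = []) (c : String) :
    (ks.foldl (fun d v => d.insert v ([] : List String)) d).getD c [] = [] := by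
  induction ks generalizing d with
  | nil => exact h c
  | cons k t ih =>
      simp only [List.foldl_cons]
      refine ih _ (fun c => ?_)
      rw [PySem.Dict.getD_insert]
      split_ifs with hc
      · rfl
      · exact h c

theorem initDict_getD (ks : List String) (c : String) : (initDict ks).getD c [] = [] :=
  initDict_getD_aux ks PySem.Dict.empty (fun c => by simp [PySem.Dict.getD_empty]) c

theorem dict_items_eq_keys_map (d : PySem.Dict String (List String)) (hn : d.keys.Nodup) :
    d.items = d.keys.map (fun k => (k, d.getD k [])) := by
  have h : ∀ p ∈ d.items, ((p.1 : String), d.getD p.1 []) = p := by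
    intro p hp
    obtain ⟨k, v⟩ := p
    simp [PySem.Dict.getD_of_mem_items d hp hn]
  simp only [PySem.Dict.keys, List.map_map]
  calc d.items = d.items.map id := (List.map_id _).symm
    _ = d.items.map (fun p => (p.1, d.getD p.1 [])) := (List.map_congr_left (fun p hp => (h p hp))).symm
    _ = d.items.map ((fun k => (k, d.getD k [])) ∘ (fun p => p.1)) := rfl

theorem dict_eq_of_keys_getD (d d' : PySem.Dict String (List String)) (hk : d.keys = d'.keys)
    (hn : d.keys.Nodup) (hg : ∀ k ∈ d.keys, d.getD k [] = d'.getD k []) : d = d' := by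
  apply PySem.Dict.ext
  rw [dict_items_eq_keys_map d hn, dict_items_eq_keys_map d' (hk ▸ hn), ← hk]
  exact List.map_congr_left (fun k hkm => by rw [hg k hkm])

theorem fillA_getD (rows : List (List String)) (i : Int) (k : String)
    (d : PySem.Dict String (List String)) (c : String) :
    (rows.foldl
      (fun d r =>
        if k == PySem.List.pyGetD r i "" then
          d.modify k [] (fun v => v ++ [PySem.List.pyGetD r (-1) ""])
        else d) d).getD c []
    = d.getD c [] ++
        (if c = k then
          (rows.filter (fun r => k == PySem.List.pyGetD r i "")).map
            (fun r => PySem.List.pyGetD r (-1) "")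
         else []) := by
  induction rows generalizing d with
  | nil => simp
  | cons r rs ih =>
      simp only [List.foldl_cons, List.filter_cons]
      by_cases hm : (k == PySem.List.pyGetD r i "") = true
      · rw [if_pos hm, ih, PySem.Dict.getD_modify]
        by_cases hc : c = k
        · subst hc
          simp [hm, List.append_assoc]
        · simp [hc]
      · rw [if_neg hm, ih]
        simp only [hm]
        rfl

theorem fillA_keys (rows : List (List String)) (i : Int) (k : String)
    (d : PySem.Dict String (List String)) (hk : k ∈ d.keys) :
    (rows.foldl
      (fun d r =>
        if k == PySem.List.pyGetD r i "" then
          d.modify k [] (fun v => v ++ [PySem.List.pyGetD r (-1) ""])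
        else d) d).keys = d.keys := by
  induction rows generalizing d with
  | nil => rfl
  | cons r rs ih =>
      simp only [List.foldl_cons]
      by_cases hm : (k == PySem.List.pyGetD r i "") = true
      · rw [if_pos hm]
        have hkeys : (d.modify k [] (fun v => v ++ [PySem.List.pyGetD r (-1) ""])).keys = d.keys := by
          rw [PySem.Dict.keys_modify, PySem.Dict.keys_insert_of_contains]
          rw [PySem.Dict.contains_iff_mem_keys]
          exact hk
        rw [ih _ (by rw [hkeys]; exact hk), hkeys]
      · rw [if_neg hm, ih _ hk]

theorem fillAouter_keys (ks : List String) (rows : List (List String)) (i : Int)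
    (d : PySem.Dict String (List String)) (hks : ∀ k ∈ ks, k ∈ d.keys) :
    (ks.foldl
      (fun d key =>
        rows.foldl
          (fun d r =>
            if key == PySem.List.pyGetD r i "" then
              d.modify key [] (fun v => v ++ [PySem.List.pyGetD r (-1) ""])
            else d) d) d).keys = d.keys := by
  induction ks generalizing d with
  | nil => rfl
  | cons k t ih =>
      simp only [List.foldl_cons]
      have h1 := fillA_keys rows i k d (hks k (by simp))
      rw [ih _ (fun k' hk' => by rw [h1]; exact hks k' (by simp [hk']))]
      exact h1

theorem fillAouter_getD (ks : List String) (rows : List (List String)) (i : Int)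
    (d : PySem.Dict String (List String)) (hn : ks.Nodup) (c : String) :
    (ks.foldl
      (fun d key =>
        rows.foldl
          (fun d r =>
            if key == PySem.List.pyGetD r i "" then
              d.modify key [] (fun v => v ++ [PySem.List.pyGetD r (-1) ""])
            else d) d) d).getD c []
    = d.getD c [] ++
        (if c ∈ ks then
          (rows.filter (fun r => c == PySem.List.pyGetD r i "")).map
            (fun r => PySem.List.pyGetD r (-1) "")
         else []) := by
  induction ks generalizing d with
  | nil => simp
  | cons k t ih =>
      simp only [List.foldl_cons]
      rw [ih _ hn.of_cons, fillA_getD]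
      by_cases hc : c = k
      · subst hc
        have hnotin : c ∉ t := (List.nodup_cons.mp hn).1
        simp [hnotin]
      · simp [hc, List.mem_cons]

theorem fillB_getD (rows : List (List String)) (i : Int)
    (d : PySem.Dict String (List String)) (c : String) :
    (rows.foldl
      (fun d r =>
        d.modify (PySem.List.pyGetD r i "") [] (fun v => v ++ [PySem.List.pyGetD r (-1) ""])) d).getD c []
    = d.getD c [] ++
        (rows.filter (fun r => PySem.List.pyGetD r i "" == c)).map
          (fun r => PySem.List.pyGetD r (-1) "") := by
  have h := PySem.Dict.getD_foldl_modify_append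
    (rows.map (fun r => (PySem.List.pyGetD r i "", PySem.List.pyGetD r (-1) ""))) d c
  rw [List.foldl_map] at h
  simpa [List.filter_map, Function.comp_def] using h

theorem fillB_keys (rows : List (List String)) (i : Int)
    (d : PySem.Dict String (List String)) (h : ∀ r ∈ rows, PySem.List.pyGetD r i "" ∈ d.keys) :
    (rows.foldl
      (fun d r =>
        d.modify (PySem.List.pyGetD r i "") [] (fun v => v ++ [PySem.List.pyGetD r (-1) ""])) d).keys
    = d.keys := by
  rw [PySem.Dict.keys_foldl_modify_key rows (fun r => PySem.List.pyGetD r i "") []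
    (fun _ r v => v ++ [PySem.List.pyGetD r (-1) ""]) d]
  rw [PySem.Set.update_eq_append_filter]
  have hfil : ((PySem.Set.ofList (rows.map (fun r => PySem.List.pyGetD r i ""))).filter
      (fun y => !(PySem.Set.contains d.keys y))) = [] := by
    rw [List.filter_eq_nil_iff]
    intro y hy
    rw [PySem.Set.mem_ofList] at hy
    obtain ⟨r, hr, rfl⟩ := List.mem_map.mp hy
    simp [PySem.Set.contains, h r hr]
  rw [hfil, List.append_nil]

def colFill (rows : List (List String)) (i : Int) : PySem.Dict String (List String) :=
  rows.foldl
    (fun d r =>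
      d.modify (PySem.List.pyGetD r i "") [] (fun v => v ++ [PySem.List.pyGetD r (-1) ""]))
    ((PySem.List.sorted (PySem.Set.ofList (rows.map (fun r => PySem.List.pyGetD r i ""))) (fun x => x)).foldl
      (fun d v => d.insert v ([] : List String)) PySem.Dict.empty)

def ksOf (rows : List (List String)) (i : Int) : List String :=
  PySem.List.sorted (PySem.Set.ofList (rows.map (fun r => PySem.List.pyGetD r i ""))) (fun x => x)

theorem colFill_eq (rows : List (List String)) (i : Int) :
    colFill rows i
    = rows.foldl
        (fun d r =>
          d.modify (PySem.List.pyGetD r i "") [] (fun v => v ++ [PySem.List.pyGetD r (-1) ""]))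
        (initDict (ksOf rows i)) := rfl

theorem colA_eq (rows : List (List String)) (i : Int) :
    (ksOf rows i).foldl
      (fun d key =>
        rows.foldl
          (fun d r =>
            if key == PySem.List.pyGetD r i "" then
              d.modify key [] (fun v => v ++ [PySem.List.pyGetD r (-1) ""])
            else d) d)
      (initDict (ksOf rows i)) = colFill rows i := by
  have hn : (ksOf rows i).Nodup := ksOf_nodup rows i
  have hkeys0 : (initDict (ksOf rows i)).keys = ksOf rows i := initDict_keys _ hn
  have hkA : _ := fillAouter_keys (ksOf rows i) rows i (initDict (ksOf rows i))
    (fun k hk => by rw [hkeys0]; exact hk)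
  have hkB : (colFill rows i).keys = (initDict (ksOf rows i)).keys := by
    rw [colFill_eq]
    exact fillB_keys rows i _ (fun r hr => by rw [hkeys0]; exact ksOf_mem rows i r hr)
  apply dict_eq_of_keys_getD
  · rw [hkA, hkB]
  · rw [hkA, hkeys0]; exact hn
  · intro k hk
    rw [hkA, hkeys0] at hk
    rw [fillAouter_getD _ _ _ _ hn, initDict_getD, colFill_eq, fillB_getD, initDict_getD]
    simp only [hk, if_true, List.nil_append]
    congr 1
    apply List.filter_congr
    intro r _
    simp [eq_comm]

theorem altB_eq (trans : List (List String)) :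
    make_attr_dict_list_alt trans =
      (((PySem.List.pyRange 0 (((PySem.List.pyGetD trans 0 []).length : Int) - 1)).map (colFill trans.tail)).map (fun d => d.items),
       ((PySem.List.pyRange 0 (((PySem.List.pyGetD trans 0 []).length : Int) - 1)).map (colFill trans.tail)).map (fun d => d.keys)) := by
  unfold make_attr_dict_list_alt
  rw [PySem.List.slice_from_one]
  rfl

theorem colA_to_colFill (trans : List (List String)) (i : Int) :
    ((PySem.List.pyRange 0
        (((PySem.List.sorted (PySem.Set.ofList
            ((PySem.List.pyRange 1 (trans.length : Int)).foldl
              (fun acc j => acc ++ [PySem.List.pyGetD (PySem.List.pyGetD trans j []) i ""]) []))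
            (fun x => x)).length : Int))).foldl
      (fun d j =>
        d.insert
          (PySem.List.pyGetD
            (PySem.List.sorted (PySem.Set.ofList
              ((PySem.List.pyRange 1 (trans.length : Int)).foldl
                (fun acc j => acc ++ [PySem.List.pyGetD (PySem.List.pyGetD trans j []) i ""]) []))
              (fun x => x)) j "")
          ([] : List String)) PySem.Dict.empty).keys.foldl
    (fun d key =>
      (PySem.List.pyRange 1 (trans.length : Int)).foldl
        (fun d j =>
          if key == PySem.List.pyGetD (PySem.List.pyGetD trans j []) i "" then
            d.modify key [] (fun v => v ++ [PySem.List.pyGetD (PySem.List.pyGetD trans j []) (-1) ""])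
          else d) d)
    ((PySem.List.pyRange 0
        (((PySem.List.sorted (PySem.Set.ofList
            ((PySem.List.pyRange 1 (trans.length : Int)).foldl
              (fun acc j => acc ++ [PySem.List.pyGetD (PySem.List.pyGetD trans j []) i ""]) []))
            (fun x => x)).length : Int))).foldl
      (fun d j =>
        d.insert
          (PySem.List.pyGetD
            (PySem.List.sorted (PySem.Set.ofList
              ((PySem.List.pyRange 1 (trans.length : Int)).foldl
                (fun acc j => acc ++ [PySem.List.pyGetD (PySem.List.pyGetD trans j []) i ""]) []))
              (fun x => x)) j "")
          ([] : List String)) PySem.Dict.empty)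
    = colFill trans.tail i := by
  have hdom : (PySem.List.pyRange 1 (trans.length : Int)).foldl
      (fun acc j => acc ++ [PySem.List.pyGetD (PySem.List.pyGetD trans j []) i ""]) []
      = trans.tail.map (fun r => PySem.List.pyGetD r i "") := by
    rw [PySem.List.foldl_pyRange_pyGetD' trans ([] : List String)
      (fun acc r => acc ++ [PySem.List.pyGetD r i ""]) [] (by norm_num)]
    rw [PySem.List.foldl_append_singleton_eq_map]
    simp [List.drop_one]
  rw [hdom]
  have hinner : (fun (d : PySem.Dict String (List String)) (key : String) =>
      (PySem.List.pyRange 1 (trans.length : Int)).foldl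
        (fun d j =>
          if key == PySem.List.pyGetD (PySem.List.pyGetD trans j []) i "" then
            d.modify key [] (fun v => v ++ [PySem.List.pyGetD (PySem.List.pyGetD trans j []) (-1) ""])
          else d) d)
      = (fun (d : PySem.Dict String (List String)) (key : String) =>
          trans.tail.foldl
            (fun d r =>
              if key == PySem.List.pyGetD r i "" then
                d.modify key [] (fun v => v ++ [PySem.List.pyGetD r (-1) ""])
              else d) d) := by
    funext d key
    rw [PySem.List.foldl_pyRange_pyGetD' trans ([] : List String)
      (fun d r =>
        if key == PySem.List.pyGetD r i "" then
          d.modify key [] (fun v => v ++ [PySem.List.pyGetD r (-1) ""])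
        else d) d (by norm_num)]
    simp [List.drop_one]
  rw [hinner]
  have hins : (PySem.List.pyRange 0
      (((PySem.List.sorted (PySem.Set.ofList (trans.tail.map (fun r => PySem.List.pyGetD r i ""))) (fun x => x)).length : Int))).foldl
      (fun d j => d.insert (PySem.List.pyGetD (PySem.List.sorted (PySem.Set.ofList (trans.tail.map (fun r => PySem.List.pyGetD r i ""))) (fun x => x)) j "") ([] : List String)) PySem.Dict.empty
      = initDict (ksOf trans.tail i) := by
    rw [PySem.List.foldl_pyRange_zero_pyGetD'
      (PySem.List.sorted (PySem.Set.ofList (trans.tail.map (fun r => PySem.List.pyGetD r i ""))) (fun x => x)) ""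
      (fun d v => d.insert v ([] : List String)) PySem.Dict.empty]
    rfl
  rw [hins, initDict_keys (ksOf trans.tail i) (ksOf_nodup trans.tail i)]
  exact colA_eq trans.tail i

theorem ports_eq (trans : List (List String)) :
    make_attr_dict_list trans = make_attr_dict_list_alt trans := by
  rw [altB_eq]
  simp only [make_attr_dict_list]
  have hX : (PySem.List.pyRange 0 (((PySem.List.pyGetD trans 0 []).length : Int) - 1)).foldl
      (fun attrs_dict_list i =>
        attrs_dict_list ++
          [((PySem.List.pyRange 0
                (((PySem.List.sorted (PySem.Set.ofList
                    ((PySem.List.pyRange 1 (trans.length : Int)).foldl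
                      (fun acc j => acc ++ [PySem.List.pyGetD (PySem.List.pyGetD trans j []) i ""]) []))
                    (fun x => x)).length : Int))).foldl
              (fun d j =>
                d.insert
                  (PySem.List.pyGetD
                    (PySem.List.sorted (PySem.Set.ofList
                      ((PySem.List.pyRange 1 (trans.length : Int)).foldl
                        (fun acc j => acc ++ [PySem.List.pyGetD (PySem.List.pyGetD trans j []) i ""]) []))
                      (fun x => x)) j "")
                  ([] : List String)) PySem.Dict.empty).keys.foldl
            (fun d key =>
              (PySem.List.pyRange 1 (trans.length : Int)).foldl
                (fun d j =>
                  if key == PySem.List.pyGetD (PySem.List.pyGetD trans j []) i "" then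
                    d.modify key [] (fun v => v ++ [PySem.List.pyGetD (PySem.List.pyGetD trans j []) (-1) ""])
                  else d) d)
            ((PySem.List.pyRange 0
                (((PySem.List.sorted (PySem.Set.ofList
                    ((PySem.List.pyRange 1 (trans.length : Int)).foldl
                      (fun acc j => acc ++ [PySem.List.pyGetD (PySem.List.pyGetD trans j []) i ""]) []))
                    (fun x => x)).length : Int))).foldl
              (fun d j =>
                d.insert
                  (PySem.List.pyGetD
                    (PySem.List.sorted (PySem.Set.ofList
                      ((PySem.List.pyRange 1 (trans.length : Int)).foldl
                        (fun acc j => acc ++ [PySem.List.pyGetD (PySem.List.pyGetD trans j []) i ""]) []))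
                      (fun x => x)) j "")
                  ([] : List String)) PySem.Dict.empty)]) []
      = (PySem.List.pyRange 0 (((PySem.List.pyGetD trans 0 []).length : Int) - 1)).map (colFill trans.tail) := by
    rw [PySem.List.foldl_append_singleton_eq_map]
    rw [List.nil_append]
    exact List.map_congr_left (fun i _ => colA_to_colFill trans i)
  rw [hX]
  have hY : (PySem.List.pyRange 0
      ((((PySem.List.pyRange 0 (((PySem.List.pyGetD trans 0 []).length : Int) - 1)).map (colFill trans.tail)).length : Int))).foldl
      (fun acc i =>
        acc ++ [(PySem.List.pyGetD ((PySem.List.pyRange 0 (((PySem.List.pyGetD trans 0 []).length : Int) - 1)).map (colFill trans.tail)) i PySem.Dict.empty).keys.foldl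
                  (fun dm key => dm ++ [key]) []]) []
      = ((PySem.List.pyRange 0 (((PySem.List.pyGetD trans 0 []).length : Int) - 1)).map (colFill trans.tail)).map (fun d => d.keys) := by
    rw [PySem.List.foldl_pyRange_zero_pyGetD'
      ((PySem.List.pyRange 0 (((PySem.List.pyGetD trans 0 []).length : Int) - 1)).map (colFill trans.tail))
      PySem.Dict.empty
      (fun acc dct => acc ++ [dct.keys.foldl (fun dm key => dm ++ [key]) []]) []]
    rw [PySem.List.foldl_append_singleton_eq_map]
    rw [List.nil_append]
    exact List.map_congr_left (fun dct _ => by rw [PySem.List.foldl_append_singleton]; simp)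
  rw [hY]

-- ===== VERDICT (by name: the statement is the Claim_ definition above) =====
theorem make_attr_dict_list_spec : Claim_equal_make_attr_dict_list := by
  intro trans _ _
  unfold Spec_make_attr_dict_list
  exact ports_eq trans
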